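-- pv_equiv track=rewrite | github.com/toto-castaldi/advent-of-code | 2015/05-py/puzzle.py | nice_second
-- ===== SOURCE A (Python) =====
-- def twice_count(string):
--     result = 0
--     for i in range(len(string)):
--         couple = string[i:i + 2]
--         if len(couple) == 2:
--             if couple[0] == couple[1]:
--                 result += 1
--     return result
--
-- def nice_second(string):
--     pairs = {}
--     for index in range(1, len(string)):
--         if index == 1 or not(string[index - 2] == string[index - 1] == string[index]):
--             current_count = pairs.get(string[index - 1:index + 1], 0)
--             current_count += 1
--             pairs[string[index - 1:index + 1]] = current_count
--     if len(pairs.values()) == 0: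
--         return False
--     pairs_count = sorted(list(pairs.values()), reverse=True)
--     if pairs_count[0] == 1 or (len(pairs_count) > 1 and pairs_count[1] > 1):
--         return False
--     if twice_count(string[0::2]) < 1 and twice_count(string[1::2]) < 1:
--         return False
--
--     return True
-- ===== SOURCE B (Python) =====
-- def nice_second(string):
--     # Count the guarded pairs via two sets instead of a dict + sort:
--     # "exactly one distinct pair occurs >= 2 times" == len(repeated) == 1.
--     seen = set()
--     repeated = set()
--     for index in range(1, len(string)):
--         if index == 1 or not (string[index - 2] == string[index - 1] == string[index]):
--             pair = string[index - 1:index + 1]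
--             if pair in seen:
--                 repeated.add(pair)
--             else:
--                 seen.add(pair)
--     if len(repeated) != 1:
--         return False
--     # repeat-with-one-gap, scanned directly instead of strided slices
--     return any(string[i] == string[i + 2] for i in range(len(string) - 2))
-- ===== Notes on version B (the rewrite author's own statement) =====
-- stated objective: simpler
-- what changed: Replaces the dict-of-counts plus reverse-sort test by two sets (seen/repeated) checked with len(repeated)==1, and replaces the twice_count helper on even/odd strided slices by a direct any(string[i]==string[i+2]) scan.
import Mathlib
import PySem

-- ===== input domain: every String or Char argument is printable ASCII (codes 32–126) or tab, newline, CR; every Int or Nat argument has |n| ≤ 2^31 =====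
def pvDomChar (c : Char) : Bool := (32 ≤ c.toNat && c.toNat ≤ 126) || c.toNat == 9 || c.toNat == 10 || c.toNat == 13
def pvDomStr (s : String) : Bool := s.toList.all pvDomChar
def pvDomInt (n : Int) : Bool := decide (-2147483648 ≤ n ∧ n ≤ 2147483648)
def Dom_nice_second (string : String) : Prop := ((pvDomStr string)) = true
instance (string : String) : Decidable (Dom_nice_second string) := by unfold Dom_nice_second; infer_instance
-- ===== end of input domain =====

-- B replaces A's dict-of-pair-counts + reverse-sort test by two sets (seen / repeated) with a
-- len(repeated)==1 check, and A's twice_count helper over even/odd strided slices by a direct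
-- any(s[i]==s[i+2]) scan; same return value, simpler decomposition.

-- ===== PORT A =====
def twice_count (s : List Char) : Int :=
  (PySem.List.pyRange 0 (s.length : Int) 1).foldl
    (fun result i =>
      let couple := PySem.List.slice s (some i) (some (i + 2))
      if couple.length = 2 then
        if PySem.List.pyGet? couple 0 = PySem.List.pyGet? couple 1 then result + 1 else result
      else result) 0

def nice_second (string : String) : Bool :=
  let s := string.toList
  let pairs : PySem.Dict (List Char) Int :=
    (PySem.List.pyRange 1 (s.length : Int) 1).foldl
      (fun pairs index =>
        if index = 1 ∨ ¬ (PySem.List.pyGet? s (index - 2) = PySem.List.pyGet? s (index - 1) ∧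
                          PySem.List.pyGet? s (index - 1) = PySem.List.pyGet? s index) then
          pairs.insert (PySem.List.slice s (some (index - 1)) (some (index + 1)))
            (pairs.getD (PySem.List.slice s (some (index - 1)) (some (index + 1))) 0 + 1)
        else pairs)
      PySem.Dict.empty
  if (PySem.Dict.values pairs).length = 0 then false
  else
    let pairs_count := PySem.List.sorted (PySem.Dict.values pairs) (fun x => x) true
    -- list indices 0 and 1 are used only when in range, so pyGetD is exact here
    if PySem.List.pyGetD pairs_count 0 0 = 1 ∨
       (pairs_count.length > 1 ∧ 1 < PySem.List.pyGetD pairs_count 1 0) then false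
    else
      -- step-2 slices never fail (step ≠ 0), so .getD [] is exact here
      if twice_count ((PySem.List.slice? s (some 0) none 2).getD []) < 1 ∧
         twice_count ((PySem.List.slice? s (some 1) none 2).getD []) < 1 then false
      else true

-- ===== PORT B =====
def nice_second_alt (string : String) : Bool :=
  let s := string.toList
  let sets : PySem.Set (List Char) × PySem.Set (List Char) :=
    (PySem.List.pyRange 1 (s.length : Int) 1).foldl
      (fun st index =>
        if index = 1 ∨ ¬ (PySem.List.pyGet? s (index - 2) = PySem.List.pyGet? s (index - 1) ∧
                          PySem.List.pyGet? s (index - 1) = PySem.List.pyGet? s index) then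
          if PySem.Set.contains st.1 (PySem.List.slice s (some (index - 1)) (some (index + 1))) then
            (st.1, PySem.Set.add st.2 (PySem.List.slice s (some (index - 1)) (some (index + 1))))
          else
            (PySem.Set.add st.1 (PySem.List.slice s (some (index - 1)) (some (index + 1))), st.2)
        else st)
      (PySem.Set.empty, PySem.Set.empty)
  if PySem.Set.len sets.2 ≠ 1 then false
  else (PySem.List.pyRange 0 ((s.length : Int) - 2) 1).any
        (fun i => PySem.List.pyGet? s i == PySem.List.pyGet? s (i + 2))

-- ===== PRECONDITION & SPEC =====
def Spec_nice_second (string : String) (out : Bool) : Prop := out = nice_second_alt string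
instance (string : String) (out : Bool) : Decidable (Spec_nice_second string out) := by unfold Spec_nice_second; infer_instance

-- ===== CLAIM (what is proved, stated in full; the proofs are below) =====
def Claim_equal_nice_second : Prop := ∀ (string : String), Dom_nice_second string → Spec_nice_second string (nice_second string)

-- ===== LEMMAS AND PROOFS =====

def pvPair (s : List Char) (index : Int) : List Char :=
  PySem.List.slice s (some (index - 1)) (some (index + 1))
def pvL (s : List Char) : List (List Char) :=
  ((PySem.List.pyRange 1 (s.length : Int) 1).filter
    (fun index => decide (index = 1 ∨ ¬ (PySem.List.pyGet? s (index - 2) = PySem.List.pyGet? s (index - 1) ∧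
                          PySem.List.pyGet? s (index - 1) = PySem.List.pyGet? s index)))).map (pvPair s)
theorem pv_foldl_filter {γ α β : Type} (P : γ → Prop) [inst : DecidablePred P]
    (g : γ → α) (f : β → α → β) :
    ∀ (l : List γ) (init : β),
      List.foldl (fun acc i => if P i then f acc (g i) else acc) init l
        = List.foldl f init ((l.filter fun i => decide (P i)).map g) := by
  intro l
  induction l with
  | nil => intro init; simp
  | cons x t ih => intro init; by_cases h : P x <;> simp [h, ih]

theorem pv_dict_eq (s : List Char) :
    (PySem.List.pyRange 1 (s.length : Int) 1).foldl
      (fun pairs index =>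
        if index = 1 ∨ ¬ (PySem.List.pyGet? s (index - 2) = PySem.List.pyGet? s (index - 1) ∧
                          PySem.List.pyGet? s (index - 1) = PySem.List.pyGet? s index) then
          pairs.insert (PySem.List.slice s (some (index - 1)) (some (index + 1)))
            (pairs.getD (PySem.List.slice s (some (index - 1)) (some (index + 1))) 0 + 1)
        else pairs)
      PySem.Dict.empty
    = PySem.Dict.counter (pvL s) := by
  have h := pv_foldl_filter
      (fun index : Int => index = 1 ∨ ¬ (PySem.List.pyGet? s (index - 2) = PySem.List.pyGet? s (index - 1) ∧
                          PySem.List.pyGet? s (index - 1) = PySem.List.pyGet? s index))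
      (fun i => PySem.List.slice s (some (i - 1)) (some (i + 1)))
      (fun (d : PySem.Dict (List Char) Int) k => d.insert k (d.getD k 0 + 1))
      (PySem.List.pyRange 1 (s.length : Int) 1) PySem.Dict.empty
  refine h.trans ?_
  rw [PySem.Dict.counter_eq_foldl]
  rfl

def pvStep (st : PySem.Set (List Char) × PySem.Set (List Char)) (p : List Char) :
    PySem.Set (List Char) × PySem.Set (List Char) :=
  if PySem.Set.contains st.1 p then (st.1, PySem.Set.add st.2 p)
  else (PySem.Set.add st.1 p, st.2)

theorem pv_step_inv (l : List (List Char)) :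
    ∀ (seen rep : PySem.Set (List Char)), seen.Nodup → rep.Nodup →
      (∀ p, p ∈ rep → p ∈ seen) →
      (l.foldl pvStep (seen, rep)).2.Nodup ∧
      (∀ p, p ∈ (l.foldl pvStep (seen, rep)).2 ↔
        p ∈ rep ∨ (p ∈ seen ∧ p ∈ l) ∨ 2 ≤ l.count p) := by
  induction l with
  | nil =>
    intro seen rep _ hr _
    exact ⟨hr, fun p => by simp⟩
  | cons x t ih =>
    intro seen rep hs hr hsub
    simp only [List.foldl_cons]
    by_cases hc : x ∈ seen
    · have hstep : pvStep (seen, rep) x = (seen, PySem.Set.add rep x) := by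
        simp [pvStep, PySem.Set.contains, hc]
      rw [hstep]
      obtain ⟨n2, hm⟩ := ih seen (PySem.Set.add rep x)
        hs (PySem.Set.nodup_add rep x hr)
        (fun p hp => by
          rcases (PySem.Set.mem_add rep x p).1 hp with h | h
          · exact hsub p h
          · exact h ▸ hc)
      refine ⟨n2, fun p => (hm p).trans ?_⟩
      by_cases hpx : p = x
      · subst hpx
        simp [PySem.Set.mem_add, hc]
      · simp [PySem.Set.mem_add, hpx, List.count_cons, if_neg (fun h : x = p => hpx h.symm)]
    · have hstep : pvStep (seen, rep) x = (PySem.Set.add seen x, rep) := by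
        simp [pvStep, PySem.Set.contains, hc]
      rw [hstep]
      obtain ⟨n2, hm⟩ := ih (PySem.Set.add seen x) rep
        (PySem.Set.nodup_add seen x hs) hr
        (fun p hp => (PySem.Set.mem_add seen x p).2 (Or.inl (hsub p hp)))
      refine ⟨n2, fun p => (hm p).trans ?_⟩
      by_cases hpx : p = x
      · subst hpx
        have hnr : p ∉ rep := fun h => hc (hsub p h)
        have hcnt : p ∈ t ↔ 0 < t.count p := List.count_pos_iff.symm
        simp [hc, hnr, List.count_cons_self]
        exact fun h => hcnt.2 (by omega)
      · simp [PySem.Set.mem_add, hpx, List.count_cons, if_neg (fun h : x = p => hpx h.symm)]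

theorem pv_rep_char (l : List (List Char)) :
    (l.foldl pvStep (PySem.Set.empty, PySem.Set.empty)).2.Nodup ∧
    (∀ p, p ∈ (l.foldl pvStep (PySem.Set.empty, PySem.Set.empty)).2 ↔ 2 ≤ l.count p) := by
  obtain ⟨hn, hm⟩ := pv_step_inv l PySem.Set.empty PySem.Set.empty
    List.nodup_nil List.nodup_nil (fun p hp => absurd hp (List.not_mem_nil))
  refine ⟨hn, fun p => (hm p).trans ?_⟩
  simp [PySem.Set.empty]

theorem pv_rep_len (l : List (List Char)) :
    (l.foldl pvStep (PySem.Set.empty, PySem.Set.empty)).2.length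
      = (PySem.Set.ofList l).countP (fun p => decide (2 ≤ l.count p)) := by
  obtain ⟨hn, hm⟩ := pv_rep_char l
  rw [List.countP_eq_length_filter]
  have hfn : ((PySem.Set.ofList l).filter (fun p => decide (2 ≤ l.count p))).Nodup :=
    (PySem.Set.nodup_ofList l).filter _
  have hmem : ∀ p, p ∈ (PySem.Set.ofList l).filter (fun p => decide (2 ≤ l.count p)) ↔
      p ∈ (l.foldl pvStep (PySem.Set.empty, PySem.Set.empty)).2 := by
    intro p
    rw [List.mem_filter, PySem.Set.mem_ofList, hm p]
    constructor
    · rintro ⟨_, h⟩; exact of_decide_eq_true h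
    · intro h
      exact ⟨List.count_pos_iff.1 (by omega), decide_eq_true h⟩
  calc (l.foldl pvStep (PySem.Set.empty, PySem.Set.empty)).2.length
      = (l.foldl pvStep (PySem.Set.empty, PySem.Set.empty)).2.toFinset.card :=
        (List.toFinset_card_of_nodup hn).symm
    _ = ((PySem.Set.ofList l).filter (fun p => decide (2 ≤ l.count p))).toFinset.card := by
        congr 1
        ext p
        simp only [List.mem_toFinset]
        exact (hmem p).symm
    _ = ((PySem.Set.ofList l).filter (fun p => decide (2 ≤ l.count p))).length :=
        List.toFinset_card_of_nodup hfn

theorem pv_sorted_test (vs : List Int) (h1 : ∀ v ∈ vs, 1 ≤ v) :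
    (vs ≠ [] ∧
     ¬ (PySem.List.pyGetD (PySem.List.sorted vs (fun x => x) true) 0 0 = 1 ∨
        ((PySem.List.sorted vs (fun x => x) true).length > 1 ∧
         1 < PySem.List.pyGetD (PySem.List.sorted vs (fun x => x) true) 1 0)))
    ↔ vs.countP (fun v => decide (2 ≤ v)) = 1 := by
  have hperm := PySem.List.sorted_perm vs (fun x => x) true
  have hpw := PySem.List.sorted_pairwise_rev vs (fun x => x)
  have hcnt : vs.countP (fun v => decide (2 ≤ v))
      = (PySem.List.sorted vs (fun x => x) true).countP (fun v => decide (2 ≤ v)) :=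
    (List.Perm.countP_eq _ hperm).symm
  have hnil : vs = [] ↔ PySem.List.sorted vs (fun x => x) true = [] :=
    (PySem.List.sorted_eq_nil_iff vs (fun x => x) true).symm
  have hmem : ∀ v ∈ PySem.List.sorted vs (fun x => x) true, 1 ≤ v :=
    fun v hv => h1 v (hperm.mem_iff.1 hv)
  rw [hcnt]
  cases hsce : PySem.List.sorted vs (fun x => x) true with
  | nil => simp [hnil.2 hsce]
  | cons a rest =>
    have hvs : vs ≠ [] := fun h => by rw [hnil.1 h] at hsce; simp at hsce
    rw [hsce] at hpw hmem
    have ha1 : 1 ≤ a := hmem a List.mem_cons_self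
    have hrest : ∀ y ∈ rest, y ≤ a := fun y hy => (List.pairwise_cons.1 hpw).1 y hy
    have hpwr : rest.Pairwise (fun x y => y ≤ x) := (List.pairwise_cons.1 hpw).2
    simp only [ne_eq, hvs, not_false_eq_true, true_and, List.countP_cons]
    cases rest with
    | nil =>
      simp [PySem.List.pyGetD]
      omega
    | cons b r2 =>
      have hb1 : 1 ≤ b := hmem b (by simp)
      have hba : b ≤ a := hrest b (by simp)
      have hr2b : ∀ y ∈ r2, y ≤ b := fun y hy => (List.pairwise_cons.1 hpwr).1 y hy
      have hr21 : ∀ y ∈ r2, 1 ≤ y := fun y hy => hmem y (by simp [hy])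
      simp [PySem.List.pyGetD, List.countP_cons]
      have hc2 : List.countP (fun v => decide (2 ≤ v)) r2 = 0 ∨ 2 ≤ b := by
        by_cases h2 : 2 ≤ b
        · exact Or.inr h2
        · refine Or.inl (List.countP_eq_zero.2 ?_)
          intro y hy
          have := hr2b y hy
          simp
          omega
      rcases hc2 with hc0 | h2b'
      · by_cases h2a : 2 ≤ a <;> by_cases h2b : 2 ≤ b <;>
          simp [h2a, h2b, hc0] <;> omega
      · have h2a : 2 ≤ a := by omega
        have hnb : ¬ b ≤ 1 := by omega
        simp [h2a, h2b', hnb]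

theorem pv_foldl_two_if {γ : Type} (P Q : γ → Prop) [DecidablePred P] [DecidablePred Q] :
    ∀ (l : List γ) (a : Int),
      l.foldl (fun r i => if P i then if Q i then r + 1 else r else r) a
        = a + (l.countP (fun i => decide (P i ∧ Q i)) : Int) := by
  intro l
  induction l with
  | nil => intro a; simp
  | cons x t ih =>
    intro a
    by_cases hp : P x <;> by_cases hq : Q x
    · simp [hp, hq, ih]
      ring
    · simp [hp, hq, ih]
    · simp [hp, hq, ih]
    · simp [hp, hq, ih]

theorem pv_twice_count_eq (t : List Char) :
    twice_count t =
      ((PySem.List.pyRange 0 (t.length : Int) 1).countP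
        (fun i => decide ((PySem.List.slice t (some i) (some (i + 2))).length = 2 ∧
          PySem.List.pyGet? (PySem.List.slice t (some i) (some (i + 2))) 0 =
          PySem.List.pyGet? (PySem.List.slice t (some i) (some (i + 2))) 1)) : Int) := by
  have h := pv_foldl_two_if
    (fun i : Int => (PySem.List.slice t (some i) (some (i + 2))).length = 2)
    (fun i : Int => PySem.List.pyGet? (PySem.List.slice t (some i) (some (i + 2))) 0 =
          PySem.List.pyGet? (PySem.List.slice t (some i) (some (i + 2))) 1)
    (PySem.List.pyRange 0 (t.length : Int) 1) 0
  simpa using h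

theorem pv_cond_char (t : List Char) (a : Nat) :
    ((PySem.List.slice t (some (a : Int)) (some ((a : Int) + 2))).length = 2 ∧
     PySem.List.pyGet? (PySem.List.slice t (some (a : Int)) (some ((a : Int) + 2))) 0 =
     PySem.List.pyGet? (PySem.List.slice t (some (a : Int)) (some ((a : Int) + 2))) 1)
    ↔ (a + 2 ≤ t.length ∧ t[a]? = t[a + 1]?) := by
  have hsl : PySem.List.slice t (some (a : Int)) (some ((a : Int) + 2)) = (t.drop a).take 2 := by
    rw [show ((a : Int) + 2) = ((a + 2 : Nat) : Int) by push_cast; ring]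
    rw [PySem.List.slice_natCast]
    congr 1
    omega
  rw [hsl]
  have hlen : ((t.drop a).take 2).length = min 2 (t.length - a) := by
    simp
  constructor
  · rintro ⟨h2, heq⟩
    have hle : a + 2 ≤ t.length := by omega
    refine ⟨hle, ?_⟩
    obtain ⟨c, d, hcd⟩ := List.length_eq_two.1 h2
    have h0 : ((t.drop a).take 2)[0]? = t[a]? := by
      rw [List.getElem?_take_of_lt (by omega), List.getElem?_drop]; norm_num
    have h1 : ((t.drop a).take 2)[1]? = t[a + 1]? := by
      rw [List.getElem?_take_of_lt (by omega), List.getElem?_drop]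
    rw [hcd] at heq h0 h1
    simp [PySem.List.pyGet?, PySem.List.pyIdx?] at heq
    rw [← h0, ← h1, heq]
    simp
  · rintro ⟨hle, heq⟩
    have h2 : ((t.drop a).take 2).length = 2 := by omega
    refine ⟨h2, ?_⟩
    obtain ⟨c, d, hcd⟩ := List.length_eq_two.1 h2
    have h0 : ((t.drop a).take 2)[0]? = t[a]? := by
      rw [List.getElem?_take_of_lt (by omega), List.getElem?_drop]; norm_num
    have h1 : ((t.drop a).take 2)[1]? = t[a + 1]? := by
      rw [List.getElem?_take_of_lt (by omega), List.getElem?_drop]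
    rw [hcd] at h0 h1 ⊢
    have : c = d := by
      have := h0.trans (heq.trans h1.symm)
      simpa using this
    simp [PySem.List.pyGet?, PySem.List.pyIdx?, this]

theorem pv_twice_count_pos (t : List Char) :
    (1 ≤ twice_count t) ↔ ∃ a : Nat, a + 2 ≤ t.length ∧ t[a]? = t[a + 1]? := by
  rw [pv_twice_count_eq]
  rw [show (1 : Int) ≤ (((PySem.List.pyRange 0 (t.length : Int) 1).countP _ : Nat) : Int) ↔
      0 < (PySem.List.pyRange 0 (t.length : Int) 1).countP
        (fun i => decide ((PySem.List.slice t (some i) (some (i + 2))).length = 2 ∧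
          PySem.List.pyGet? (PySem.List.slice t (some i) (some (i + 2))) 0 =
          PySem.List.pyGet? (PySem.List.slice t (some i) (some (i + 2))) 1)) from by
    constructor <;> intro h <;> omega]
  rw [List.countP_pos_iff]
  constructor
  · rintro ⟨i, hi, hp⟩
    have hmem := (PySem.List.mem_pyRange_one (a := 0) (b := (t.length : Int)) (x := i)).1 hi
    have h0 : 0 ≤ i := hmem.1
    have hcast : i = ((i.toNat : Nat) : Int) := by omega
    rw [hcast] at hp
    have := (pv_cond_char t i.toNat).1 (by simpa using of_decide_eq_true hp)
    exact ⟨i.toNat, this⟩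
  · rintro ⟨a, hle, heq⟩
    refine ⟨(a : Int), ?_, ?_⟩
    · rw [PySem.List.mem_pyRange_one]
      constructor <;> [positivity; omega]
    · exact decide_eq_true ((pv_cond_char t a).2 ⟨hle, heq⟩)

theorem pv_filterMap_map {β : Type} :
    ∀ (n : Nat) (f : Nat → Option β) (g : Nat → β),
      (∀ k, k < n → f k = some (g k)) →
      (List.range n).filterMap f = (List.range n).map g := by
  intro n
  induction n with
  | zero => intro f g _; simp
  | succ m ih =>
    intro f g h
    rw [List.range_succ, List.filterMap_append, List.map_append,
      ih f g (fun k hk => h k (by omega))]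
    simp [h m (by omega)]

theorem pv_sliceE (s : List Char) :
    (PySem.List.slice? s (some 0) none 2).getD []
      = (List.range ((s.length + 1) / 2)).map (fun k => s.getD (2 * k) default) := by
  simp only [PySem.List.slice?, PySem.List.sliceIndices]
  norm_num
  have hc : (if 0 < s.length then (((s.length : Int) + 2 - 1) / 2).toNat else 0)
      = (s.length + 1) / 2 := by
    split_ifs with h <;> omega
  rw [hc]
  apply pv_filterMap_map
  intro k hk
  have h2k : 2 * k < s.length := by omega
  rw [show ((2 * (k : Int)).toNat) = 2 * k by omega]
  rw [List.getElem?_eq_getElem h2k]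
  simp

theorem pv_sliceO (s : List Char) :
    (PySem.List.slice? s (some 1) none 2).getD []
      = (List.range (s.length / 2)).map (fun k => s.getD (2 * k + 1) default) := by
  simp only [PySem.List.slice?, PySem.List.sliceIndices]
  norm_num
  by_cases hs : s.length = 0
  · simp [hs]
  · have hmin : min 1 (s.length : Int) = 1 := by omega
    rw [hmin]
    have hc : (if 1 < s.length then (((s.length : Int) - 1 + 2 - 1) / 2).toNat else 0)
        = s.length / 2 := by
      split_ifs with h <;> omega
    rw [hc]
    apply pv_filterMap_map
    intro k hk
    have h2k : 2 * k + 1 < s.length := by omega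
    rw [show ((1 + 2 * (k : Int)).toNat) = 2 * k + 1 by omega]
    rw [List.getElem?_eq_getElem h2k]
    simp

theorem pv_gapE (s : List Char) :
    (1 ≤ twice_count ((PySem.List.slice? s (some 0) none 2).getD []))
    ↔ ∃ j : Nat, 2 * j + 2 < s.length ∧ s[2 * j]? = s[2 * j + 2]? := by
  rw [pv_twice_count_pos, pv_sliceE]
  constructor
  · rintro ⟨j, hj, heq⟩
    simp only [List.length_map, List.length_range] at hj
    have hb : 2 * j + 2 < s.length := by omega
    refine ⟨j, hb, ?_⟩
    simp only [List.getElem?_map, List.getElem?_range,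
      show j < (s.length + 1) / 2 from by omega,
      show j + 1 < (s.length + 1) / 2 from by omega, Option.map_some] at heq
    have e1 : (2 : Nat) * (j + 1) = 2 * j + 2 := by ring
    rw [e1] at heq
    rw [List.getD_eq_getElem?_getD, List.getD_eq_getElem?_getD,
        List.getElem?_eq_getElem (show 2 * j < s.length from by omega),
        List.getElem?_eq_getElem (show 2 * j + 2 < s.length from by omega)] at heq
    rw [List.getElem?_eq_getElem (show 2 * j < s.length from by omega),
        List.getElem?_eq_getElem (show 2 * j + 2 < s.length from by omega)]
    simpa using heq
  · rintro ⟨j, hb, heq⟩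
    refine ⟨j, ?_, ?_⟩
    · simp only [List.length_map, List.length_range]; omega
    · simp only [List.getElem?_map, List.getElem?_range,
        show j < (s.length + 1) / 2 from by omega,
        show j + 1 < (s.length + 1) / 2 from by omega, Option.map_some]
      have e1 : (2 : Nat) * (j + 1) = 2 * j + 2 := by ring
      rw [e1]
      rw [List.getElem?_eq_getElem (show 2 * j < s.length from by omega),
          List.getElem?_eq_getElem (show 2 * j + 2 < s.length from by omega)] at heq
      rw [List.getD_eq_getElem?_getD, List.getD_eq_getElem?_getD,
          List.getElem?_eq_getElem (show 2 * j < s.length from by omega),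
          List.getElem?_eq_getElem (show 2 * j + 2 < s.length from by omega)]
      simpa using heq

theorem pv_gapO (s : List Char) :
    (1 ≤ twice_count ((PySem.List.slice? s (some 1) none 2).getD []))
    ↔ ∃ j : Nat, 2 * j + 3 < s.length ∧ s[2 * j + 1]? = s[2 * j + 3]? := by
  rw [pv_twice_count_pos, pv_sliceO]
  constructor
  · rintro ⟨j, hj, heq⟩
    simp only [List.length_map, List.length_range] at hj
    have hb : 2 * j + 3 < s.length := by omega
    refine ⟨j, hb, ?_⟩
    simp only [List.getElem?_map, List.getElem?_range,
      show j < s.length / 2 from by omega,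
      show j + 1 < s.length / 2 from by omega, Option.map_some] at heq
    have e1 : (2 : Nat) * (j + 1) + 1 = 2 * j + 3 := by ring
    rw [e1] at heq
    rw [List.getD_eq_getElem?_getD, List.getD_eq_getElem?_getD,
        List.getElem?_eq_getElem (show 2 * j + 1 < s.length from by omega),
        List.getElem?_eq_getElem (show 2 * j + 3 < s.length from by omega)] at heq
    rw [List.getElem?_eq_getElem (show 2 * j + 1 < s.length from by omega),
        List.getElem?_eq_getElem (show 2 * j + 3 < s.length from by omega)]
    simpa using heq
  · rintro ⟨j, hb, heq⟩
    refine ⟨j, ?_, ?_⟩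
    · simp only [List.length_map, List.length_range]; omega
    · simp only [List.getElem?_map, List.getElem?_range,
        show j < s.length / 2 from by omega,
        show j + 1 < s.length / 2 from by omega, Option.map_some]
      have e1 : (2 : Nat) * (j + 1) + 1 = 2 * j + 3 := by ring
      rw [e1]
      rw [List.getElem?_eq_getElem (show 2 * j + 1 < s.length from by omega),
          List.getElem?_eq_getElem (show 2 * j + 3 < s.length from by omega)] at heq
      rw [List.getD_eq_getElem?_getD, List.getD_eq_getElem?_getD,
          List.getElem?_eq_getElem (show 2 * j + 1 < s.length from by omega),
          List.getElem?_eq_getElem (show 2 * j + 3 < s.length from by omega)]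
      simpa using heq

theorem pv_gap (s : List Char) :
    (¬ (twice_count ((PySem.List.slice? s (some 0) none 2).getD []) < 1 ∧
        twice_count ((PySem.List.slice? s (some 1) none 2).getD []) < 1))
    ↔ ((PySem.List.pyRange 0 ((s.length : Int) - 2) 1).any
        (fun i => PySem.List.pyGet? s i == PySem.List.pyGet? s (i + 2)) = true) := by
  rw [List.any_eq_true]
  have hE := pv_gapE s
  have hO := pv_gapO s
  constructor
  · intro h
    have h' : (1 ≤ twice_count ((PySem.List.slice? s (some 0) none 2).getD [])) ∨
        (1 ≤ twice_count ((PySem.List.slice? s (some 1) none 2).getD [])) := by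
      by_contra hc
      rw [not_or] at hc
      obtain ⟨h1, h2⟩ := hc
      exact h ⟨by omega, by omega⟩
    rcases h' with h' | h'
    · obtain ⟨j, hb, heq⟩ := hE.1 h'
      refine ⟨((2 * j : Nat) : Int), ?_, ?_⟩
      · rw [PySem.List.mem_pyRange_one]; omega
      · rw [beq_iff_eq, PySem.List.pyGet?_natCast,
          show ((2 * j : Nat) : Int) + 2 = ((2 * j + 2 : Nat) : Int) from by push_cast; ring,
          PySem.List.pyGet?_natCast]
        exact heq
    · obtain ⟨j, hb, heq⟩ := hO.1 h'
      refine ⟨((2 * j + 1 : Nat) : Int), ?_, ?_⟩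
      · rw [PySem.List.mem_pyRange_one]; omega
      · rw [beq_iff_eq, PySem.List.pyGet?_natCast,
          show ((2 * j + 1 : Nat) : Int) + 2 = ((2 * j + 3 : Nat) : Int) from by push_cast; ring,
          PySem.List.pyGet?_natCast]
        exact heq
  · rintro ⟨i, hi, heq⟩
    rw [PySem.List.mem_pyRange_one] at hi
    rw [beq_iff_eq] at heq
    have h0 : 0 ≤ i := hi.1
    have hlt : i.toNat + 2 < s.length := by omega
    rw [show i = ((i.toNat : Nat) : Int) from by omega, PySem.List.pyGet?_natCast,
      show ((i.toNat : Nat) : Int) + 2 = ((i.toNat + 2 : Nat) : Int) from by push_cast; ring,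
      PySem.List.pyGet?_natCast] at heq
    rcases Nat.even_or_odd i.toNat with ⟨j, hj⟩ | ⟨j, hj⟩
    · intro hcon
      have := hE.2 ⟨j, by omega, by
        rw [show 2 * j = i.toNat from by omega]
        exact heq⟩
      omega
    · intro hcon
      have := hO.2 ⟨j, by omega, by
        rw [show 2 * j + 3 = (2 * j + 1) + 2 from by ring, show 2 * j + 1 = i.toNat from by omega]
        exact heq⟩
      omega

theorem pv_values_counter (l : List (List Char)) :
    PySem.Dict.values (PySem.Dict.counter l)
      = (PySem.Set.ofList l).map (fun k => (l.count k : Int)) := by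
  have h := PySem.Dict.items_counter l
  simp only [PySem.Dict.values, h, List.map_map]
  rfl

theorem pv_vs_ge1 (l : List (List Char)) :
    ∀ v ∈ (PySem.Set.ofList l).map (fun k => (l.count k : Int)), 1 ≤ v := by
  intro v hv
  obtain ⟨k, hk, rfl⟩ := List.mem_map.1 hv
  have : k ∈ l := (PySem.Set.mem_ofList l k).1 hk
  have := List.count_pos_iff.2 this
  omega

theorem pv_countP_cast (l : List (List Char)) :
    ((PySem.Set.ofList l).map (fun k => (l.count k : Int))).countP (fun v => decide (2 ≤ v))
      = (PySem.Set.ofList l).countP (fun p => decide (2 ≤ l.count p)) := by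
  rw [List.countP_map]
  apply List.countP_congr
  intro p _
  simp only [Function.comp_apply, decide_eq_true_eq]
  omega

theorem pv_sets_eq (s : List Char) :
    (PySem.List.pyRange 1 (s.length : Int) 1).foldl
      (fun st index =>
        if index = 1 ∨ ¬ (PySem.List.pyGet? s (index - 2) = PySem.List.pyGet? s (index - 1) ∧
                          PySem.List.pyGet? s (index - 1) = PySem.List.pyGet? s index) then
          if PySem.Set.contains st.1 (PySem.List.slice s (some (index - 1)) (some (index + 1))) then
            (st.1, PySem.Set.add st.2 (PySem.List.slice s (some (index - 1)) (some (index + 1))))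
          else
            (PySem.Set.add st.1 (PySem.List.slice s (some (index - 1)) (some (index + 1))), st.2)
        else st)
      (PySem.Set.empty, PySem.Set.empty)
    = (pvL s).foldl pvStep (PySem.Set.empty, PySem.Set.empty) := by
  have h := pv_foldl_filter
      (fun index : Int => index = 1 ∨ ¬ (PySem.List.pyGet? s (index - 2) = PySem.List.pyGet? s (index - 1) ∧
                          PySem.List.pyGet? s (index - 1) = PySem.List.pyGet? s index))
      (fun i => PySem.List.slice s (some (i - 1)) (some (i + 1)))
      pvStep
      (PySem.List.pyRange 1 (s.length : Int) 1) (PySem.Set.empty, PySem.Set.empty)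
  refine Eq.trans (Eq.trans ?_ h) ?_
  · rfl
  · rfl

-- ===== VERDICT (by name: the statement is the Claim_ definition above) =====
theorem nice_second_spec : Claim_equal_nice_second := by
  intro string _
  unfold Spec_nice_second
  simp only [nice_second, nice_second_alt]
  rw [pv_dict_eq string.toList, pv_sets_eq string.toList, pv_values_counter (pvL string.toList)]
  set s := string.toList with hs
  set l := pvL s with hl
  set vs := (PySem.Set.ofList l).map (fun k => (l.count k : Int)) with hvs
  have hpairs := pv_sorted_test vs (pv_vs_ge1 l)
  have hcnt := pv_countP_cast l
  have hreplen := pv_rep_len l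
  have hgap := pv_gap s
  by_cases hb1 : PySem.Set.len ((l.foldl pvStep (PySem.Set.empty, PySem.Set.empty)).2) ≠ 1
  · rw [if_pos hb1]
    have hne1 : vs.countP (fun v => decide (2 ≤ v)) ≠ 1 := by
      rw [← hvs] at hcnt
      rw [hcnt, ← hreplen]
      intro h
      apply hb1
      simp only [PySem.Set.len, h]
      rfl
    have hnp := fun hp => hne1 (hpairs.1 hp)
    by_cases h0 : vs.length = 0
    · rw [if_pos h0]
    · rw [if_neg h0]
      have hvne : vs ≠ [] := fun h => h0 (by simp [h])
      have hC2 : PySem.List.pyGetD (PySem.List.sorted vs (fun x => x) true) 0 0 = 1 ∨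
          ((PySem.List.sorted vs (fun x => x) true).length > 1 ∧
            1 < PySem.List.pyGetD (PySem.List.sorted vs (fun x => x) true) 1 0) := by
        by_contra hc
        exact hnp ⟨hvne, hc⟩
      rw [if_pos hC2]
  · rw [if_neg hb1]
    have hlen1 : vs.countP (fun v => decide (2 ≤ v)) = 1 := by
      rw [← hvs] at hcnt
      rw [hcnt, ← hreplen]
      simp only [PySem.Set.len, not_not] at hb1
      omega
    obtain ⟨hvne, hC2⟩ := hpairs.2 hlen1
    rw [if_neg (show ¬ vs.length = 0 from fun h => hvne (List.length_eq_zero_iff.1 h))]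
    rw [if_neg hC2]
    by_cases hc3 : twice_count ((PySem.List.slice? s (some 0) none 2).getD []) < 1 ∧
        twice_count ((PySem.List.slice? s (some 1) none 2).getD []) < 1
    · rw [if_pos hc3]
      cases hA : ((PySem.List.pyRange 0 ((s.length : Int) - 2) 1).any
          (fun i => PySem.List.pyGet? s i == PySem.List.pyGet? s (i + 2))) with
      | false => rfl
      | true => exact absurd hc3 (hgap.2 hA)
    · rw [if_neg hc3]
      exact (hgap.1 hc3).symm
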